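-- pv_equiv track=rewrite | github.com/tmddud0103/coding-practice | 중력 낙차/s1.py | calculating_falling_box
-- ===== SOURCE A (Python) =====
-- def calculating_falling_box(height_of_the_tallest_box, rooms_of_boxes):
--     height_fall_one_box = 0 #한 박스가 떨어지는 높이
--     highest_fall_height = 0 #가장 많이 떨어지는 박스의 높이
--     for x_line in range(height_of_the_tallest_box, 0, -1):
--         fallen_count = 0  # 떨어지는 높이
--         safe_box_count = 0  # 밑에서 막아주는 박스 갯수
--         for x_axis_reverse in rooms_of_boxes[::-1]:
--             if x_line > x_axis_reverse:
--                 fallen_count += 1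
--             else:
--                 height_fall_one_box = fallen_count - safe_box_count
--                 fallen_count += 1
--                 safe_box_count += 1
--                 if height_fall_one_box > highest_fall_height:
--                     highest_fall_height = height_fall_one_box
--     return highest_fall_height
-- ===== SOURCE B (Python) =====
-- def calculating_falling_box(height_of_the_tallest_box, rooms_of_boxes):
--     # One pass over box positions: each box only needs to be checked at the
--     # single highest level min(h, H) it blocks (the count of lower boxes to its
--     # right is monotone in the level), so the per-level outer loop disappears.
--     best = 0
--     rest = rooms_of_boxes
--     while rest:
--         h, rest = rest[0], rest[1:]
--         cap = h if h < height_of_the_tallest_box else height_of_the_tallest_box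
--         if cap >= 1:
--             c = sum(1 for x in rest if x < cap)
--             if c > best:
--                 best = c
--     return best
-- ===== Notes on version B (the rewrite author's own statement) =====
-- stated objective: alternative
-- what changed: B drops A's outer loop over every level 1..H: for each box position it evaluates the count of lower boxes to its right only at the single level min(h,H) that box blocks (monotonicity in the level makes that level optimal), one quadratic pass over positions instead of a scan per level.
import Mathlib
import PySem

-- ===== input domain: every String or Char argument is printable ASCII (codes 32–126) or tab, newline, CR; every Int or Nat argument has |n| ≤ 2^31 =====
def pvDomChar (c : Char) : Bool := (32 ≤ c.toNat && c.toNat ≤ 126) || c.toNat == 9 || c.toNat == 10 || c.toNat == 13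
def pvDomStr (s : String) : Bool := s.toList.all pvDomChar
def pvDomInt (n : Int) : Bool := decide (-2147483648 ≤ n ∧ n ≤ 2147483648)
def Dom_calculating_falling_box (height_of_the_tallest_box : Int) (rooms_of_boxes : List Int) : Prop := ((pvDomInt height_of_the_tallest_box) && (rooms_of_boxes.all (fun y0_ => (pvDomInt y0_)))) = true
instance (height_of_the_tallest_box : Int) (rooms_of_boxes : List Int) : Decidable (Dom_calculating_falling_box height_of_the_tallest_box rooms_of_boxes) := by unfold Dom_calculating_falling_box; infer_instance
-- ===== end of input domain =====

-- B replaces A's loop over every level 1..H by a single quadratic pass over box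
-- positions, checking each box only at the highest level min(h, H) it blocks.

-- ===== PORT A =====
-- the inner 'for x_axis_reverse in rooms_of_boxes[::-1]' loop; state is
-- (height_fall_one_box, highest_fall_height, fallen_count, safe_box_count)
def pvInnerA (x_line : Int) (R : List Int) (s : Int × Int × Int × Int) :
    Int × Int × Int × Int :=
  R.foldl (fun s e =>
    if x_line > e then (s.1, s.2.1, s.2.2.1 + 1, s.2.2.2)
    else (s.2.2.1 - s.2.2.2,
          if s.2.2.1 - s.2.2.2 > s.2.1 then s.2.2.1 - s.2.2.2 else s.2.1,
          s.2.2.1 + 1, s.2.2.2 + 1)) s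

def calculating_falling_box (height_of_the_tallest_box : Int) (rooms_of_boxes : List Int) : Int :=
  ((PySem.List.pyRange height_of_the_tallest_box 0 (-1)).foldl
    (fun (st : Int × Int) x_line =>
      ((pvInnerA x_line ((PySem.List.slice? rooms_of_boxes none none (-1)).getD [])
          (st.1, st.2, 0, 0)).1,
       (pvInnerA x_line ((PySem.List.slice? rooms_of_boxes none none (-1)).getD [])
          (st.1, st.2, 0, 0)).2.1))
    (0, 0)).2

-- ===== PORT B =====
-- B's while-loop over the remaining suffix, carrying 'best'
def pvAltGo (height_of_the_tallest_box : Int) (rest : List Int) (best : Int) : Int :=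
  match rest with
  | [] => best
  | h :: rest =>
    let cap := if h < height_of_the_tallest_box then h else height_of_the_tallest_box
    if 1 ≤ cap then
      let c : Int := (rest.countP (fun x => decide (x < cap)) : Nat)
      pvAltGo height_of_the_tallest_box rest (if c > best then c else best)
    else pvAltGo height_of_the_tallest_box rest best

def calculating_falling_box_alt (height_of_the_tallest_box : Int) (rooms_of_boxes : List Int) : Int :=
  pvAltGo height_of_the_tallest_box rooms_of_boxes 0

-- ===== PRECONDITION & SPEC =====
def Spec_calculating_falling_box (height_of_the_tallest_box : Int) (rooms_of_boxes : List Int) (out : Int) : Prop := out = calculating_falling_box_alt height_of_the_tallest_box rooms_of_boxes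
instance (height_of_the_tallest_box : Int) (rooms_of_boxes : List Int) (out : Int) : Decidable (Spec_calculating_falling_box height_of_the_tallest_box rooms_of_boxes out) := by unfold Spec_calculating_falling_box; infer_instance

-- ===== CLAIM (what is proved, stated in full; the proofs are below) =====
def Claim_equal_calculating_falling_box : Prop := ∀ (height_of_the_tallest_box : Int) (rooms_of_boxes : List Int), Dom_calculating_falling_box height_of_the_tallest_box rooms_of_boxes → Spec_calculating_falling_box height_of_the_tallest_box rooms_of_boxes (calculating_falling_box height_of_the_tallest_box rooms_of_boxes)

-- ===== LEMMAS AND PROOFS =====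

-- number of elements of l strictly below x, as an Int
def pvCnt (x : Int) (l : List Int) : Int := (l.countP (fun e => decide (e < x)) : Nat)

lemma pvCnt_nil (x : Int) : pvCnt x [] = 0 := rfl

lemma pvCnt_cons (x e : Int) (l : List Int) :
    pvCnt x (e :: l) = (if e < x then 1 else 0) + pvCnt x l := by
  by_cases h : e < x
  · simp [pvCnt, h]
    omega
  · simp [pvCnt, h]

lemma pvCnt_mono (x y : Int) (l : List Int) (h : x ≤ y) : pvCnt x l ≤ pvCnt y l := by
  have : l.countP (fun e => decide (e < x)) ≤ l.countP (fun e => decide (e < y)) :=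
    List.countP_mono_left (by intro a _ ha; simp at ha ⊢; omega)
  simpa [pvCnt] using Int.ofNat_le.mpr this

lemma pvCnt_reverse (x : Int) (l : List Int) : pvCnt x l.reverse = pvCnt x l := by
  simp [pvCnt, List.countP_reverse]

-- full characterisation of the inner loop's 'highest_fall_height' component
lemma pvInnerA_spec (x : Int) (R : List Int) : ∀ (hfo b f s : Int),
    b ≤ (pvInnerA x R (hfo, b, f, s)).2.1 ∧
    ((pvInnerA x R (hfo, b, f, s)).2.1 = b ∨
      ∃ p e q, R = p ++ e :: q ∧ x ≤ e ∧
        (pvInnerA x R (hfo, b, f, s)).2.1 = (f - s) + pvCnt x p) ∧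
    (∀ p e q, R = p ++ e :: q → x ≤ e →
      (f - s) + pvCnt x p ≤ (pvInnerA x R (hfo, b, f, s)).2.1) := by
  induction R with
  | nil =>
    intro hfo b f s
    refine ⟨le_refl _, Or.inl rfl, ?_⟩
    intro p e q hpq
    exact absurd hpq (by simp)
  | cons e' R' ih =>
    intro hfo b f s
    by_cases hx : e' < x
    · have hstep : pvInnerA x (e' :: R') (hfo, b, f, s)
          = pvInnerA x R' (hfo, b, f + 1, s) := by
        simp [pvInnerA, hx]
      obtain ⟨ih1, ih2, ih3⟩ := ih hfo b (f + 1) s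
      rw [hstep]
      refine ⟨ih1, ?_, ?_⟩
      · rcases ih2 with h | ⟨p, e, q, hpq, hxe, hval⟩
        · exact Or.inl h
        · refine Or.inr ⟨e' :: p, e, q, by simp [hpq], hxe, ?_⟩
          rw [hval, pvCnt_cons, if_pos hx]
          ring
      · intro p e q hpq hxe
        cases p with
        | nil =>
          simp at hpq
          omega
        | cons a p' =>
          simp at hpq
          obtain ⟨hae, hR'⟩ := hpq
          have := ih3 p' e q hR' hxe
          rw [← hae] at *
          rw [pvCnt_cons, if_pos hx]
          omega
    · have hstep : pvInnerA x (e' :: R') (hfo, b, f, s)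
          = pvInnerA x R' (f - s, if f - s > b then f - s else b, f + 1, s + 1) := by
        simp [pvInnerA, hx]
      set b' := if f - s > b then f - s else b with hb'
      obtain ⟨ih1, ih2, ih3⟩ := ih (f - s) b' (f + 1) (s + 1)
      rw [hstep]
      refine ⟨?_, ?_, ?_⟩
      · have : b ≤ b' := by rw [hb']; split <;> omega
        exact le_trans this ih1
      · rcases ih2 with h | ⟨p, e, q, hpq, hxe, hval⟩
        · rw [h, hb']
          by_cases hc : f - s > b
          · refine Or.inr ⟨[], e', R', rfl, by omega, ?_⟩
            simp [pvCnt_nil, hc]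
          · simp [hc]
        · refine Or.inr ⟨e' :: p, e, q, by simp [hpq], hxe, ?_⟩
          rw [hval, pvCnt_cons, if_neg hx]
          ring
      · intro p e q hpq hxe
        cases p with
        | nil =>
          simp at hpq
          have hle : f - s ≤ b' := by rw [hb']; split <;> omega
          simpa [pvCnt_nil] using le_trans hle ih1
        | cons a p' =>
          simp at hpq
          obtain ⟨hae, hR'⟩ := hpq
          have := ih3 p' e q hR' hxe
          rw [← hae, pvCnt_cons, if_neg hx]
          omega

-- characterisation of A's outer loop over the list of levels
lemma pvOuterA_spec (R : List Int) (xs : List Int) : ∀ (hfo b : Int),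
    b ≤ (xs.foldl
        (fun (st : Int × Int) x_line =>
          ((pvInnerA x_line R (st.1, st.2, 0, 0)).1, (pvInnerA x_line R (st.1, st.2, 0, 0)).2.1)) (hfo, b)).2 ∧
    ((xs.foldl
        (fun (st : Int × Int) x_line =>
          ((pvInnerA x_line R (st.1, st.2, 0, 0)).1, (pvInnerA x_line R (st.1, st.2, 0, 0)).2.1)) (hfo, b)).2 = b ∨
      ∃ x ∈ xs, ∃ p e q, R = p ++ e :: q ∧ x ≤ e ∧
        (xs.foldl
          (fun (st : Int × Int) x_line =>
            ((pvInnerA x_line R (st.1, st.2, 0, 0)).1, (pvInnerA x_line R (st.1, st.2, 0, 0)).2.1)) (hfo, b)).2 = pvCnt x p) ∧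
    (∀ x ∈ xs, ∀ p e q, R = p ++ e :: q → x ≤ e →
      pvCnt x p ≤ (xs.foldl
        (fun (st : Int × Int) x_line =>
          ((pvInnerA x_line R (st.1, st.2, 0, 0)).1, (pvInnerA x_line R (st.1, st.2, 0, 0)).2.1)) (hfo, b)).2) := by
  induction xs with
  | nil =>
    intro hfo b
    exact ⟨le_refl _, Or.inl rfl, by simp⟩
  | cons x0 xs' ih =>
    intro hfo b
    have hstep : ((x0 :: xs').foldl
        (fun (st : Int × Int) x_line =>
          ((pvInnerA x_line R (st.1, st.2, 0, 0)).1, (pvInnerA x_line R (st.1, st.2, 0, 0)).2.1)) (hfo, b))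
      = (xs'.foldl
        (fun (st : Int × Int) x_line =>
          ((pvInnerA x_line R (st.1, st.2, 0, 0)).1, (pvInnerA x_line R (st.1, st.2, 0, 0)).2.1))
        ((pvInnerA x0 R (hfo, b, 0, 0)).1, (pvInnerA x0 R (hfo, b, 0, 0)).2.1)) := by
      simp
    obtain ⟨in1, in2, in3⟩ := pvInnerA_spec x0 R hfo b 0 0
    obtain ⟨ih1, ih2, ih3⟩ := ih (pvInnerA x0 R (hfo, b, 0, 0)).1 (pvInnerA x0 R (hfo, b, 0, 0)).2.1
    rw [hstep]
    refine ⟨le_trans in1 ih1, ?_, ?_⟩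
    · rcases ih2 with h | ⟨x, hxmem, p, e, q, hpq, hxe, hval⟩
      · rw [h]
        rcases in2 with h' | ⟨p, e, q, hpq, hxe, hval⟩
        · exact Or.inl h'
        · exact Or.inr ⟨x0, by simp, p, e, q, hpq, hxe, by omega⟩
      · exact Or.inr ⟨x, by simp [hxmem], p, e, q, hpq, hxe, hval⟩
    · intro x hxmem p e q hpq hxe
      rcases List.mem_cons.mp hxmem with h | h
      · subst h
        have := in3 p e q hpq hxe
        have h0 : (0 : Int) - 0 + pvCnt x p = pvCnt x p := by ring
        rw [h0] at this
        exact le_trans this ih1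
      · exact ih3 x h p e q hpq hxe

-- characterisation of B's loop
lemma pvAltGo_spec (H : Int) (l : List Int) : ∀ (b : Int),
    b ≤ pvAltGo H l b ∧
    (pvAltGo H l b = b ∨
      ∃ p e q, l = p ++ e :: q ∧ 1 ≤ (if e < H then e else H) ∧
        pvAltGo H l b = pvCnt (if e < H then e else H) q) ∧
    (∀ p e q, l = p ++ e :: q → 1 ≤ (if e < H then e else H) →
      pvCnt (if e < H then e else H) q ≤ pvAltGo H l b) := by
  induction l with
  | nil =>
    intro b
    refine ⟨le_refl _, Or.inl rfl, ?_⟩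
    intro p e q hpq
    exact absurd hpq (by simp)
  | cons h rest ih =>
    intro b
    by_cases hcap : 1 ≤ (if h < H then h else H)
    · have hstep : pvAltGo H (h :: rest) b
          = pvAltGo H rest
            (if (↑(rest.countP (fun x => decide (x < if h < H then h else H))) : Int) > b
             then (↑(rest.countP (fun x => decide (x < if h < H then h else H))) : Int) else b) := by
        simp only [pvAltGo]
        rw [if_pos hcap]
      set c : Int := (↑(rest.countP (fun x => decide (x < if h < H then h else H))) : Int) with hc
      have hcpv : c = pvCnt (if h < H then h else H) rest := rfl
      set b' := if c > b then c else b with hb'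
      obtain ⟨ih1, ih2, ih3⟩ := ih b'
      rw [hstep]
      refine ⟨?_, ?_, ?_⟩
      · have : b ≤ b' := by rw [hb']; split <;> omega
        exact le_trans this ih1
      · rcases ih2 with heq | ⟨p, e, q, hpq, he1, hval⟩
        · by_cases hcb : c > b
          · refine Or.inr ⟨[], h, rest, rfl, hcap, ?_⟩
            rw [heq, hb', if_pos hcb]
            exact hcpv
          · exact Or.inl (by rw [heq, hb', if_neg hcb])
        · exact Or.inr ⟨h :: p, e, q, by simp [hpq], he1, hval⟩
      · intro p e q hpq he1
        cases p with
        | nil =>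
          simp at hpq
          obtain ⟨hh, hq⟩ := hpq
          subst hh; subst hq
          have : c ≤ b' := by rw [hb']; split <;> omega
          rw [← hcpv]
          exact le_trans this ih1
        | cons a p' =>
          simp at hpq
          obtain ⟨_, hR⟩ := hpq
          exact ih3 p' e q hR he1
    · have hstep : pvAltGo H (h :: rest) b = pvAltGo H rest b := by
        simp only [pvAltGo]
        rw [if_neg hcap]
      obtain ⟨ih1, ih2, ih3⟩ := ih b
      rw [hstep]
      refine ⟨ih1, ?_, ?_⟩
      · rcases ih2 with heq | ⟨p, e, q, hpq, he1, hval⟩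
        · exact Or.inl heq
        · exact Or.inr ⟨h :: p, e, q, by simp [hpq], he1, hval⟩
      · intro p e q hpq he1
        cases p with
        | nil =>
          simp at hpq
          obtain ⟨hh, hq⟩ := hpq
          subst hh
          exact absurd he1 hcap
        | cons a p' =>
          simp at hpq
          exact ih3 p' e q hpq.2 he1

-- a split of the reversed list is a split of the list, and vice versa
lemma pvReverse_split (l p q : List Int) (e : Int) (h : l.reverse = p ++ e :: q) :
    l = q.reverse ++ e :: p.reverse := by
  have := congrArg List.reverse h
  simpa using this

-- ===== VERDICT (by name: the statement is the Claim_ definition above) =====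
theorem calculating_falling_box_spec : Claim_equal_calculating_falling_box := by
  intro H rooms _
  unfold Spec_calculating_falling_box
  unfold calculating_falling_box calculating_falling_box_alt
  rw [PySem.List.slice?_none_none_neg_one]
  simp only [Option.getD_some]
  obtain ⟨a1, a2, a3⟩ := pvOuterA_spec rooms.reverse (PySem.List.pyRange H 0 (-1)) 0 0
  obtain ⟨b1, b2, b3⟩ := pvAltGo_spec H rooms 0
  apply le_antisymm
  · rcases a2 with h | ⟨x, hxmem, p, e, q, hpq, hxe, hval⟩
    · rw [h]; exact b1
    · have hx : 0 < x ∧ x ≤ H := (PySem.List.mem_pyRange_neg_one.mp hxmem)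
      have hsplit := pvReverse_split rooms p q e hpq
      have hxcap : x ≤ (if e < H then e else H) := by split <;> omega
      have hcap1 : (1:Int) ≤ (if e < H then e else H) := by omega
      have hmono : pvCnt x p ≤ pvCnt (if e < H then e else H) p :=
        pvCnt_mono x _ p hxcap
      have hub := b3 q.reverse e p.reverse hsplit hcap1
      rw [pvCnt_reverse] at hub
      rw [hval]
      exact le_trans hmono hub
  · rcases b2 with h | ⟨p, e, q, hpq, he1, hval⟩
    · rw [h]; exact a1
    · have hcape : (if e < H then e else H) ≤ e := by split <;> omega
      have hcapH : (if e < H then e else H) ≤ H := by split <;> omega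
      have hmem : (if e < H then e else H) ∈ PySem.List.pyRange H 0 (-1) :=
        PySem.List.mem_pyRange_neg_one.mpr ⟨by omega, hcapH⟩
      have hsplit : rooms.reverse = q.reverse ++ e :: p.reverse := by
        rw [hpq]; simp
      have hub := a3 _ hmem q.reverse e p.reverse hsplit hcape
      rw [pvCnt_reverse] at hub
      rw [hval]
      exact hub
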